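-- pv_equiv track=rewrite | github.com/Radium-bit/BlindWatermarkGUI | watermark/dataShielder3.py | _block_deinterleave
-- ===== SOURCE A (Python) =====
-- from typing import Dict, List, Union, Tuple, Optional
--
-- def _block_deinterleave(bits: List[bool], depth: int) -> List[bool]:
--     """块去交织"""
--     if depth <= 1:
--         return bits
--
--     total_bits = len(bits)
--     cols = (total_bits + depth - 1) // depth
--
--     rows = [[] for _ in range(depth)]
--     for i, bit in enumerate(bits):
--         row_idx = i % depth
--         rows[row_idx].append(bit)
--
--     deinterleaved = []
--     for col in range(cols):
--         for row_idx in range(depth):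
--             if col < len(rows[row_idx]):
--                 deinterleaved.append(rows[row_idx][col])
--
--     return deinterleaved
-- ===== SOURCE B (Python) =====
-- from typing import List
--
-- def _block_deinterleave(bits: List[bool], depth: int) -> List[bool]:
--     """Block deinterleave: single pass via the direct index formula, no rows table."""
--     if depth <= 1:
--         return bits
--     total_bits = len(bits)
--     cols = (total_bits + depth - 1) // depth
--     return [bits[col * depth + row]
--             for col in range(cols)
--             for row in range(depth)
--             if col * depth + row < total_bits]
-- ===== Notes on version B (the rewrite author's own statement) =====
-- stated objective: simpler
-- what changed: replaces the two-phase rows distribution table plus column-wise collection with a single-pass comprehension reading bits[col*depth+row] directly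
import Mathlib
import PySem

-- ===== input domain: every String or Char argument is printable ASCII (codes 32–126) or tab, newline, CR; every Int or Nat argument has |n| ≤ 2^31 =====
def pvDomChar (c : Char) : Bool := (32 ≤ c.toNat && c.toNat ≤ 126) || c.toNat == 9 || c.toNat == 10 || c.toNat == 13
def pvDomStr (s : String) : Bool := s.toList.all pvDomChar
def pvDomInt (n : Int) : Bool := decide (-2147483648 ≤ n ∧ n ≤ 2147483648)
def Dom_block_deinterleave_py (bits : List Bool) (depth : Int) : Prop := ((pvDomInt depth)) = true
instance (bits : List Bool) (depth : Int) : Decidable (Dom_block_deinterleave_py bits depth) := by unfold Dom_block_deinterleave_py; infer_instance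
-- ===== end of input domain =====

-- B replaces A's two-phase rows distribution table with a single pass using the
-- direct index formula bits[col*depth + row]; objective: simpler.

-- ===== PORT A =====
def block_deinterleave_py (bits : List Bool) (depth : Int) : List Bool :=
  if depth ≤ 1 then bits
  else
    let total_bits : Int := bits.length
    let cols : Int := PySem.Int.floordiv (total_bits + depth - 1) depth
    let rows : List (List Bool) :=
      (PySem.List.enumerate bits).foldl
        (fun rows ib =>
          let row_idx := PySem.Int.mod ib.1 depth
          rows.modify row_idx.toNat (fun row => row ++ [ib.2]))
        (List.replicate depth.toNat [])
    (PySem.List.pyRange 0 cols).foldl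
      (fun acc col =>
        (PySem.List.pyRange 0 depth).foldl
          (fun acc row_idx =>
            if col < ((rows.getD row_idx.toNat []).length : Int) then
              acc ++ [(rows.getD row_idx.toNat []).getD col.toNat false]
            else acc)
          acc)
      []

-- ===== PORT B =====
def block_deinterleave_py_alt (bits : List Bool) (depth : Int) : List Bool :=
  if depth ≤ 1 then bits
  else
    let total_bits : Int := bits.length
    let cols : Int := PySem.Int.floordiv (total_bits + depth - 1) depth
    (PySem.List.pyRange 0 cols).flatMap (fun col =>
      (PySem.List.pyRange 0 depth).filterMap (fun row =>
        if col * depth + row < total_bits then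
          PySem.List.pyGet? bits (col * depth + row)
        else none))

-- ===== PRECONDITION & SPEC =====
def Spec_block_deinterleave_py (bits : List Bool) (depth : Int) (out : List Bool) : Prop := out = block_deinterleave_py_alt bits depth
instance (bits : List Bool) (depth : Int) (out : List Bool) : Decidable (Spec_block_deinterleave_py bits depth out) := by unfold Spec_block_deinterleave_py; infer_instance

-- ===== CLAIM (what is proved, stated in full; the proofs are below) =====
def Claim_equal_block_deinterleave_py : Prop := ∀ (bits : List Bool) (depth : Int), Dom_block_deinterleave_py bits depth → Spec_block_deinterleave_py bits depth (block_deinterleave_py bits depth)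

-- ===== LEMMAS AND PROOFS =====

-- every d-th element of bits, starting at offset r
def everyD : List Bool → Nat → Nat → List Bool
  | [], _, _ => []
  | b :: bs, 0, d => b :: everyD bs (d - 1) d
  | _ :: bs, r + 1, d => everyD bs r d

-- offset of row r when distribution starts at global index k
def offD (k r d : Nat) : Nat := if k % d ≤ r then r - k % d else r + d - k % d

lemma mod_succ_char (k d : Nat) (hd : 2 ≤ d) :
    (k + 1) % d = if k % d = d - 1 then 0 else k % d + 1 := by
  have h1 : (k + 1) % d = (k % d + 1 % d) % d := Nat.add_mod k 1 d
  have h2 : 1 % d = 1 := Nat.mod_eq_of_lt (by omega)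
  have h3 : k % d < d := Nat.mod_lt _ (by omega)
  rw [h2] at h1
  split_ifs with h
  · rw [h1, h, Nat.sub_add_cancel (by omega), Nat.mod_self]
  · rw [h1, Nat.mod_eq_of_lt (by omega)]

lemma everyD_len_iff (bits : List Bool) : ∀ (r col d : Nat), 2 ≤ d → r < d →
    (col < (everyD bits r d).length ↔ col * d + r < bits.length) := by
  induction bits with
  | nil => intro r col d _ _; simp [everyD]
  | cons b bs ih =>
    intro r col d hd hr
    cases r with
    | zero =>
      cases col with
      | zero => simp [everyD]
      | succ c =>
        have := ih (d - 1) c d hd (by omega)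
        have hmul : (c + 1) * d = c * d + d := by ring
        simp only [everyD, List.length_cons]
        constructor
        · intro h; have := this.mp (by omega); omega
        · intro h; have := this.mpr (by omega); omega
    | succ r' =>
      have := ih r' col d hd (by omega)
      simp only [everyD, List.length_cons]
      omega

lemma everyD_getD (bits : List Bool) : ∀ (r col d : Nat), 2 ≤ d → r < d →
    col * d + r < bits.length →
    (everyD bits r d).getD col false = bits.getD (col * d + r) false := by
  induction bits with
  | nil => intro r col d _ _ h; simp at h
  | cons b bs ih =>
    intro r col d hd hr hlt
    cases r with
    | zero =>
      cases col with
      | zero => simp [everyD]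
      | succ c =>
        have hmul : (c + 1) * d = c * d + d := by ring
        have heq : (c + 1) * d + 0 = (c * d + (d - 1)) + 1 := by omega
        have hih := ih (d - 1) c d hd (by omega) (by simp at hlt; omega)
        rw [show everyD (b :: bs) 0 d = b :: everyD bs (d - 1) d from rfl,
          List.getD_cons_succ, heq, List.getD_cons_succ]
        exact hih
    | succ r' =>
      have hih := ih r' col d hd (by omega) (by simp at hlt; omega)
      rw [show everyD (b :: bs) (r' + 1) d = everyD bs r' d from rfl, hih,
        show col * d + (r' + 1) = (col * d + r') + 1 from by omega, List.getD_cons_succ]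

lemma getD_modify (rows : List (List Bool)) (i r : Nat) (f : List Bool → List Bool) :
    (rows.modify i f).getD r [] =
      if i = r ∧ r < rows.length then f (rows.getD r []) else rows.getD r [] := by
  simp only [List.getD, List.getElem?_modify]
  by_cases hr : r < rows.length
  · rw [List.getElem?_eq_getElem hr]
    by_cases hi : i = r <;> simp [hi, hr]
  · rw [List.getElem?_eq_none (by omega)]
    simp [hr]

lemma fold_inv (bits : List Bool) : ∀ (k : Nat) (d : Nat) (rows : List (List Bool)),
    2 ≤ d → rows.length = d → ∀ r, r < d →
    ((PySem.List.enumerate bits (k : Int)).foldl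
      (fun rows ib =>
        rows.modify (PySem.Int.mod ib.1 (d : Int)).toNat (fun row => row ++ [ib.2])) rows).getD r []
    = rows.getD r [] ++ everyD bits (offD k r d) d := by
  induction bits with
  | nil => intro k d rows hd hl r hr; simp [PySem.List.enumerate, everyD]
  | cons b bs ih =>
    intro k d rows hd hl r hr
    rw [PySem.List.enumerate_cons, List.foldl_cons]
    have hcast : ((k : Int) + 1) = ((k + 1 : Nat) : Int) := by push_cast; ring
    rw [hcast]
    have hmod : (PySem.Int.mod (k : Int) (d : Int)).toNat = k % d := by
      rw [PySem.Int.mod_natCast]; omega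
    have hlen : (rows.modify (PySem.Int.mod (k : Int) (d : Int)).toNat
        (fun row => row ++ [b])).length = d := by rw [List.length_modify]; exact hl
    rw [ih (k + 1) d _ hd hlen r hr]
    rw [hmod] at *
    rw [getD_modify]
    have hm : k % d < d := Nat.mod_lt _ (by omega)
    have hm' : (k + 1) % d = if k % d = d - 1 then 0 else k % d + 1 := mod_succ_char k d hd
    have hm1 : ((k + 1) % d = 0 ∧ k % d = d - 1) ∨ ((k + 1) % d = k % d + 1 ∧ k % d ≠ d - 1) := by
      by_cases hke : k % d = d - 1
      · left; rw [hm', if_pos hke]; exact ⟨rfl, hke⟩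
      · right; rw [hm', if_neg hke]; exact ⟨rfl, hke⟩
    by_cases hcase : k % d = r
    · -- this element lands in row r
      rw [if_pos ⟨hcase, by omega⟩]
      have h0 : offD k r d = 0 := by simp only [offD]; rw [if_pos (by omega)]; omega
      have h1 : offD (k + 1) r d = d - 1 := by
        simp only [offD]; split_ifs with h <;> omega
      rw [h0, h1]
      simp [everyD]
    · rw [if_neg (by intro h; exact hcase h.1)]
      have hpos : 0 < offD k r d := by simp only [offD]; split_ifs <;> omega
      have hstep : offD k r d = offD (k + 1) r d + 1 := by
        simp only [offD]; split_ifs <;> omega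
      congr 1
      rw [hstep]
      rfl

lemma rows_final (bits : List Bool) (d : Nat) (hd : 2 ≤ d) (r : Nat) (hr : r < d) :
    ((PySem.List.enumerate bits).foldl
      (fun rows ib =>
        rows.modify (PySem.Int.mod ib.1 (d : Int)).toNat (fun row => row ++ [ib.2]))
      (List.replicate d ([] : List Bool))).getD r []
    = everyD bits r d := by
  have h := fold_inv bits 0 d (List.replicate d []) hd (by simp) r hr
  have h0 : offD 0 r d = r := by simp [offD]
  simp only [Nat.cast_zero] at h
  rw [show PySem.List.enumerate bits = PySem.List.enumerate bits 0 from rfl, h, h0]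
  simp [List.getD_eq_getElem?_getD, hr]

-- the inner per-column list is the col-th chunk of size d
lemma inner_take (bits : List Bool) : ∀ (d s : Nat),
    ((List.range d).filter (fun r => decide (s + r < bits.length))).map
      (fun r => bits.getD (s + r) false) = (bits.drop s).take d := by
  intro d
  induction d with
  | zero => intro s; simp
  | succ d ih =>
    intro s
    rw [List.range_succ, List.filter_append, List.map_append, ih, List.take_add_one]
    congr 1
    by_cases h : s + d < bits.length
    · rw [List.getElem?_drop, List.getElem?_eq_getElem h]
      simp [h, List.getD_eq_getElem?_getD]
    · rw [List.getElem?_drop, List.getElem?_eq_none (by omega)]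
      simp [h]

lemma innerB_take (bits : List Bool) : ∀ (d s : Nat),
    (List.range d).filterMap (fun r => if s + r < bits.length then bits[s + r]? else none)
      = (bits.drop s).take d := by
  intro d
  induction d with
  | zero => intro s; simp
  | succ d ih =>
    intro s
    rw [List.range_succ, List.filterMap_append, ih, List.take_add_one]
    congr 1
    by_cases h : s + d < bits.length
    · rw [List.getElem?_drop, List.getElem?_eq_getElem h]
      simp [h]
    · rw [List.getElem?_drop, List.getElem?_eq_none (by omega)]
      simp [h]

lemma chunk_take (bits : List Bool) (d : Nat) : ∀ (cols : Nat),
    (List.range cols).flatMap (fun c => (bits.drop (c * d)).take d) = bits.take (cols * d) := by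
  intro cols
  induction cols with
  | zero => simp
  | succ c ih =>
    rw [List.range_succ, List.flatMap_append, ih]
    simp only [List.flatMap_cons, List.flatMap_nil, List.append_nil]
    rw [← List.take_add]
    congr 1
    ring

-- shared arithmetic: cols = ceil(n / depth) covers all of bits
lemma cols_nonneg (n : Nat) (depth : Int) (h : 1 < depth) :
    0 ≤ PySem.Int.floordiv ((n : Int) + depth - 1) depth := by
  set cols := PySem.Int.floordiv ((n : Int) + depth - 1) depth with hc
  have hmul := PySem.Int.floordiv_mul_add_mod ((n : Int) + depth - 1) depth
  have hmn : 0 ≤ PySem.Int.mod ((n : Int) + depth - 1) depth :=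
    PySem.Int.mod_nonneg _ (by omega)
  have hml : PySem.Int.mod ((n : Int) + depth - 1) depth < depth :=
    PySem.Int.mod_lt _ (by omega)
  rw [← hc] at hmul
  have hge : (n : Int) ≤ cols * depth := by omega
  by_contra hneg
  rw [Int.not_le] at hneg
  have : cols * depth ≤ -1 * depth := mul_le_mul_of_nonneg_right (by omega) (by omega)
  omega

-- cols = ceil(n / depth) covers all of bits
lemma cols_covers (n : Nat) (depth : Int) (h : 1 < depth) :
    n ≤ (PySem.Int.floordiv ((n : Int) + depth - 1) depth).toNat * depth.toNat := by
  set cols := PySem.Int.floordiv ((n : Int) + depth - 1) depth with hc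
  have hmul := PySem.Int.floordiv_mul_add_mod ((n : Int) + depth - 1) depth
  have hmn : 0 ≤ PySem.Int.mod ((n : Int) + depth - 1) depth :=
    PySem.Int.mod_nonneg _ (by omega)
  have hml : PySem.Int.mod ((n : Int) + depth - 1) depth < depth :=
    PySem.Int.mod_lt _ (by omega)
  rw [← hc] at hmul
  have hge : (n : Int) ≤ cols * depth := by omega
  have hcols : 0 ≤ cols := cols_nonneg n depth h
  have : ((cols.toNat * depth.toNat : Nat) : Int) = cols * depth := by
    push_cast
    rw [Int.toNat_of_nonneg hcols, Int.toNat_of_nonneg (by omega)]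
  omega

lemma alt_eq_bits (bits : List Bool) (depth : Int) (h : ¬ depth ≤ 1) :
    block_deinterleave_py_alt bits depth = bits := by
  unfold block_deinterleave_py_alt
  rw [if_neg h]
  dsimp only []
  have hd2 : 2 ≤ depth.toNat := by omega
  have hdep : ((depth.toNat : Nat) : Int) = depth := Int.toNat_of_nonneg (by omega)
  set d := depth.toNat with hdn
  set n := bits.length with hn
  set cols := PySem.Int.floordiv ((n : Int) + depth - 1) depth with hc
  have hcols0 : cols = ((cols.toNat : Nat) : Int) :=
    (Int.toNat_of_nonneg (cols_nonneg n depth (by omega))).symm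
  rw [hcols0, ← hdep]
  simp only [PySem.List.pyRange_zero_natCast, List.flatMap_map, List.filterMap_map,
    Function.comp]
  have hinner : ∀ c : Nat, (List.range d).filterMap
      (fun x : Nat => if (c : Int) * (d : Int) + (x : Int) < (n : Int) then
        PySem.List.pyGet? bits ((c : Int) * (d : Int) + (x : Int)) else none)
      = (bits.drop (c * d)).take d := by
    intro c
    rw [← innerB_take bits d (c * d)]
    apply List.filterMap_congr
    intro r _
    have hcast : (c : Int) * (d : Int) + (r : Int) = ((c * d + r : Nat) : Int) := by
      push_cast; ring
    rw [hcast, PySem.List.pyGet?_natCast]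
    by_cases hlt : c * d + r < n
    · rw [if_pos (by exact_mod_cast hlt), if_pos hlt]
    · rw [if_neg (by exact_mod_cast hlt), if_neg hlt]
  rw [List.flatMap_congr (fun (c : Nat) (_ : c ∈ List.range cols.toNat) => hinner c),
    chunk_take bits d cols.toNat]
  exact List.take_of_length_le (cols_covers n depth (by omega))


lemma a_eq_bits (bits : List Bool) (depth : Int) (h : ¬ depth ≤ 1) :
    block_deinterleave_py bits depth = bits := by
  unfold block_deinterleave_py
  rw [if_neg h]
  dsimp only []
  have hd2 : 2 ≤ depth.toNat := by omega
  have hdep : ((depth.toNat : Nat) : Int) = depth := Int.toNat_of_nonneg (by omega)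
  set d := depth.toNat with hdn
  set n := bits.length with hn
  set cols := PySem.Int.floordiv ((n : Int) + depth - 1) depth with hc
  have hcols0 : cols = ((cols.toNat : Nat) : Int) :=
    (Int.toNat_of_nonneg (cols_nonneg n depth (by omega))).symm
  set rows := (PySem.List.enumerate bits).foldl
      (fun rows ib =>
        rows.modify (PySem.Int.mod ib.1 depth).toNat (fun row => row ++ [ib.2]))
      (List.replicate d ([] : List Bool)) with hrows
  rw [hcols0, ← hdep]
  simp only [PySem.List.pyRange_zero_natCast]
  have hfold : ∀ (acc : List Bool) (col : Int),
      ((List.range d).map (fun k : Nat => (k : Int))).foldl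
        (fun acc row_idx =>
          if col < ((rows.getD row_idx.toNat []).length : Int) then
            acc ++ [(rows.getD row_idx.toNat []).getD col.toNat false]
          else acc) acc
      = acc ++ (((List.range d).map (fun k : Nat => (k : Int))).filter
          (fun row_idx => decide (col < ((rows.getD row_idx.toNat []).length : Int)))).map
          (fun row_idx => (rows.getD row_idx.toNat []).getD col.toNat false) := by
    intro acc col
    have := PySem.List.foldl_append_if
      (fun row_idx : Int => decide (col < ((rows.getD row_idx.toNat []).length : Int)))
      (fun row_idx : Int => (rows.getD row_idx.toNat []).getD col.toNat false)
      ((List.range d).map (fun k : Nat => (k : Int))) acc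
    simpa using this
  rw [show (fun (acc : List Bool) (col : Int) =>
        ((List.range d).map (fun k : Nat => (k : Int))).foldl
          (fun acc row_idx =>
            if col < ((rows.getD row_idx.toNat []).length : Int) then
              acc ++ [(rows.getD row_idx.toNat []).getD col.toNat false]
            else acc) acc)
      = (fun (acc : List Bool) (col : Int) =>
          acc ++ (((List.range d).map (fun k : Nat => (k : Int))).filter
            (fun row_idx => decide (col < ((rows.getD row_idx.toNat []).length : Int)))).map
            (fun row_idx => (rows.getD row_idx.toNat []).getD col.toNat false))
      from funext fun acc => funext fun col => hfold acc col]
  rw [PySem.List.foldl_append_eq_flatMap, List.nil_append]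
  simp only [List.flatMap_map, List.filter_map, List.map_map, Int.toNat_natCast]
  have hrows_eq : ∀ r : Nat, r < d → rows.getD r [] = everyD bits r d := by
    intro r hr
    rw [hrows, ← hdep]
    exact rows_final bits d hd2 r hr
  have hinner : ∀ c : Nat,
      List.map ((fun row_idx : Int => (rows.getD row_idx.toNat []).getD c false) ∘
          fun k : Nat => (k : Int))
        (List.filter ((fun row_idx : Int =>
            decide ((c : Int) < ((rows.getD row_idx.toNat []).length : Int))) ∘
          fun k : Nat => (k : Int)) (List.range d))
      = (bits.drop (c * d)).take d := by
    intro c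
    simp only [Function.comp_def]
    show List.map (fun x : Nat => (rows.getD x []).getD c false)
        (List.filter (fun x : Nat => decide ((c : Int) < ((rows.getD x []).length : Int)))
          (List.range d))
      = List.take d (List.drop (c * d) bits)
    have hpred : ∀ r ∈ List.range d,
        (decide ((c : Int) < ((rows.getD r []).length : Int))) = decide (c * d + r < n) := by
      intro r hr
      have hrd : r < d := List.mem_range.mp hr
      rw [hrows_eq r hrd]
      apply decide_eq_decide.mpr
      rw [Nat.cast_lt]
      exact everyD_len_iff bits r c d hd2 hrd
    rw [List.filter_congr hpred]
    have hmap : ∀ r ∈ (List.range d).filter (fun r => decide (c * d + r < n)),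
        (rows.getD r []).getD c false = bits.getD (c * d + r) false := by
      intro r hr
      have hmem := List.mem_filter.mp hr
      have hrd : r < d := List.mem_range.mp hmem.1
      have hlt : c * d + r < n := of_decide_eq_true hmem.2
      rw [hrows_eq r hrd]
      exact everyD_getD bits r c d hd2 hrd (by rw [← hn]; exact hlt)
    rw [List.map_congr_left hmap]
    have := inner_take bits d (c * d)
    rw [← hn] at this
    exact this
  rw [List.flatMap_congr (fun (c : Nat) (_ : c ∈ List.range cols.toNat) => hinner c),
    chunk_take bits d cols.toNat]
  exact List.take_of_length_le (cols_covers n depth (by omega))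

-- ===== VERDICT (by name: the statement is the Claim_ definition above) =====
theorem block_deinterleave_py_spec : Claim_equal_block_deinterleave_py := by
  intro bits depth _
  unfold Spec_block_deinterleave_py
  by_cases h : depth ≤ 1
  · unfold block_deinterleave_py block_deinterleave_py_alt
    rw [if_pos h, if_pos h]
  · rw [a_eq_bits bits depth h, alt_eq_bits bits depth h]
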